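-- pv_equiv track=rewrite | github.com/pypi-data/pypi-mirror-288 | packages/ascend-deployer/ascend_deployer-6.0rc2-py3-none-any.whl/ascend_deployer/library/system_report.py | get_npu_info
-- ===== SOURCE A (Python) =====
-- import collections
--
-- def get_npu_info(outputs):
--     check_next_line = False
--     npus = collections.defaultdict(lambda: 0)
--     for line in outputs.splitlines():
--         if "====" in line:
--             check_next_line = True
--             continue
--         if check_next_line:
--             words = line.split()
--             if len(words) > 11:
--                 npus[words[2]] += 1
--             check_next_line = False
--     return npus
-- ===== SOURCE B (Python) =====
-- import collections
--
-- def get_npu_info(outputs):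
--     npus = collections.defaultdict(lambda: 0)
--     lines = outputs.splitlines()
--     for prev, cur in zip(lines, lines[1:]):
--         if "====" in prev and "====" not in cur:
--             words = cur.split()
--             if len(words) > 11:
--                 npus[words[2]] += 1
--     return npus
-- ===== Notes on version B (the rewrite author's own statement) =====
-- stated objective: simpler
-- what changed: Replaces the check_next_line boolean state machine with a stateless single pass over adjacent line pairs (zip(lines, lines[1:])): a line is counted exactly when the previous line contains '====' and it does not.
import Mathlib
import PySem

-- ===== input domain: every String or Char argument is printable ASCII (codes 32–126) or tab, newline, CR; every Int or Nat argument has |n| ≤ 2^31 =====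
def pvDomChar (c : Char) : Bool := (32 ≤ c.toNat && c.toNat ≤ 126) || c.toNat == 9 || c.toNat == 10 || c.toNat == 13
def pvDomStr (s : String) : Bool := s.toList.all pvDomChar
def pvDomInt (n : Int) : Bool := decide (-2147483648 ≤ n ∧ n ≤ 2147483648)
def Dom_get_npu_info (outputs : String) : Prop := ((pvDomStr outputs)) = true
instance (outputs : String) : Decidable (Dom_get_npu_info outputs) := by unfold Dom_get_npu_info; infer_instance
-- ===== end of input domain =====

-- B replaces A's check_next_line state machine by a stateless pass over adjacent line pairs (simpler decomposition; same cost).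

-- ===== PORT A =====
-- loop body of A: state = (check_next_line, npus)
def npuStepA (st : Bool × PySem.Dict String Int) (line : String) : Bool × PySem.Dict String Int :=
  if PySem.Str.isIn "====" line then (true, st.2)
  else if st.1 then
    let words := PySem.Str.split₀ line
    (false, if 11 < words.length then st.2.modify (PySem.List.pyGetD words 2 "") 0 (· + 1) else st.2)
  else (false, st.2)

def get_npu_info (outputs : String) : List (String × Int) :=
  (((PySem.Str.splitlines outputs).foldl npuStepA (false, PySem.Dict.empty)).2).items

-- ===== PORT B =====
-- loop body of B: per adjacent pair (prev, cur)
def npuStepB (d : PySem.Dict String Int) (p : String × String) : PySem.Dict String Int :=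
  if PySem.Str.isIn "====" p.1 && !(PySem.Str.isIn "====" p.2) then
    let words := PySem.Str.split₀ p.2
    if 11 < words.length then d.modify (PySem.List.pyGetD words 2 "") 0 (· + 1) else d
  else d

def get_npu_info_alt (outputs : String) : List (String × Int) :=
  let lines := PySem.Str.splitlines outputs
  ((lines.zip lines.tail).foldl npuStepB PySem.Dict.empty).items

-- ===== PRECONDITION & SPEC =====
def Spec_get_npu_info (outputs : String) (out : List (String × Int)) : Prop := out = get_npu_info_alt outputs
instance (outputs : String) (out : List (String × Int)) : Decidable (Spec_get_npu_info outputs out) := by unfold Spec_get_npu_info; infer_instance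

-- ===== CLAIM (what is proved, stated in full; the proofs are below) =====
def Claim_equal_get_npu_info : Prop := ∀ (outputs : String), Dom_get_npu_info outputs → Spec_get_npu_info outputs (get_npu_info outputs)

-- ===== LEMMAS AND PROOFS =====

-- A's flag after processing a line is exactly "the line contains ====", and the dict updates
-- of A's remaining loop coincide with B's fold over the pairs starting at that line.
theorem npu_fold_aux (rest : List String) : ∀ (l : String) (d : PySem.Dict String Int),
    (rest.foldl npuStepA (PySem.Str.isIn "====" l, d)).2
      = (((l :: rest).zip rest).foldl npuStepB d) := by
  induction rest with
  | nil => intro l d; simp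
  | cons c rest' ih =>
    intro l d
    have hstep : npuStepA (PySem.Str.isIn "====" l, d) c
        = (PySem.Str.isIn "====" c, npuStepB d (l, c)) := by
      unfold npuStepA npuStepB
      cases h1 : PySem.Str.isIn "====" c <;> cases h2 : PySem.Str.isIn "====" l <;> simp
    simp only [List.foldl_cons, hstep, List.zip_cons_cons]
    exact ih c (npuStepB d (l, c))

theorem get_npu_info_spec : Claim_equal_get_npu_info := by
  intro outputs _
  unfold Spec_get_npu_info get_npu_info get_npu_info_alt
  cases h : PySem.Str.splitlines outputs with
  | nil => simp
  | cons l rest =>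
    have hfirst : npuStepA (false, PySem.Dict.empty) l
        = (PySem.Str.isIn "====" l, PySem.Dict.empty) := by
      unfold npuStepA
      cases PySem.Str.isIn "====" l <;> simp
    simp only [List.foldl_cons, hfirst, List.tail_cons]
    rw [npu_fold_aux rest l PySem.Dict.empty]
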